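-- pv_equiv track=rewrite | github.com/JKapostins/just-prompt | src/just_prompt/molecules/build_context.py | count_max_backticks
-- ===== SOURCE A (Python) =====
-- def count_max_backticks(content: str) -> int:
--     """
--     Count the maximum number of consecutive backticks in content.
--
--     Args:
--         content: The content to analyze
--
--     Returns:
--         Maximum number of consecutive backticks found
--     """
--     max_backticks = 0
--     current_backticks = 0
--
--     for char in content:
--         if char == '`':
--             current_backticks += 1
--             max_backticks = max(max_backticks, current_backticks)
--         else:
--             current_backticks = 0
--
--     return max_backticks
-- ===== SOURCE B (Python) =====
-- def count_max_backticks(content: str) -> int: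
--     """Mask every non-backtick char with a space, split on whitespace to get the
--     maximal backtick runs, then take the max run length (0 if none)."""
--     masked = ''.join(ch if ch == '`' else ' ' for ch in content)
--     runs = masked.split()
--     return max((len(r) for r in runs), default=0)
-- ===== Notes on version B (the rewrite author's own statement) =====
-- stated objective: idiomatic
-- what changed: Replaces the incremental max/current-run state machine with a build-all-runs-then-reduce decomposition: non-backtick characters are masked to spaces, str.split() materializes the list of maximal backtick runs, and max over their lengths (default 0) gives the answer.
import Mathlib
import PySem

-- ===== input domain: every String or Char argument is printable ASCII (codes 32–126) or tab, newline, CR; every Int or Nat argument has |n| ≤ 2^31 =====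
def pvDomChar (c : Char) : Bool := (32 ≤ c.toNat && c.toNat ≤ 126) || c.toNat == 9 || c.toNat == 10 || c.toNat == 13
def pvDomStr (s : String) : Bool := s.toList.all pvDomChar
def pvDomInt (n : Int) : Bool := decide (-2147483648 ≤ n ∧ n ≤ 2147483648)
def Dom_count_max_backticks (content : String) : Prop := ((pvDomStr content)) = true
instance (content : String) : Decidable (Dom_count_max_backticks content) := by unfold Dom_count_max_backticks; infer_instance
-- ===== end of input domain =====

-- B: replaces A's incremental max/current-run state machine by masking non-backticks to spaces,
-- str.split() to materialize all maximal backtick runs, then a max-reduce over their lengths (idiomatic; not claimed faster).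


-- ===== PORT A =====
def count_max_backticks (content : String) : Int :=
  (content.toList.foldl
    (fun st ch =>
      if ch = '`' then (max st.1 (st.2 + 1), st.2 + 1)
      else (st.1, (0 : Int)))
    ((0 : Int), (0 : Int))).1

-- ===== PORT B =====
def count_max_backticks_alt (content : String) : Int :=
  let masked := String.ofList (content.toList.map (fun ch => if ch = '`' then ch else ' '))
  let runs := PySem.Str.split₀ masked
  (runs.map (fun r => PySem.Str.len r)).foldl max 0

-- ===== PRECONDITION & SPEC =====
def Spec_count_max_backticks (content : String) (out : Int) : Prop := out = count_max_backticks_alt content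
instance (content : String) (out : Int) : Decidable (Spec_count_max_backticks content out) := by unfold Spec_count_max_backticks; infer_instance

-- ===== CLAIM (what is proved, stated in full; the proofs are below) =====
def Claim_equal_count_max_backticks : Prop := ∀ (content : String), Dom_count_max_backticks content → Spec_count_max_backticks content (count_max_backticks content)

-- ===== LEMMAS AND PROOFS =====

/-- Run lengths of maximal backtick runs in `l`, with `k` backticks already pending. -/
def pvR : List Char → Nat → List Nat
  | [], k => if k = 0 then [] else [k]
  | c :: s, k => if c = '`' then pvR s (k + 1) else (if k = 0 then pvR s 0 else k :: pvR s 0)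

def pvMaxI (ns : List Nat) : Int := ns.foldl (fun (a : Int) (n : Nat) => max a (n : Int)) 0

lemma pvMaxI_acc (ns : List Nat) : ∀ a : Int, 0 ≤ a →
    ns.foldl (fun (x : Int) (n : Nat) => max x (n : Int)) a = max a (pvMaxI ns) := by
  induction ns with
  | nil => intro a ha; simp only [List.foldl, pvMaxI]; omega
  | cons n t ih =>
      intro a ha
      rw [List.foldl_cons, ih (max a n) (by omega)]
      rw [show pvMaxI (n :: t) = t.foldl (fun (x : Int) (m : Nat) => max x (m : Int)) (max 0 (n : Int)) from rfl,
          ih (max 0 n) (by omega)]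
      omega

lemma pvMaxI_cons (n : Nat) (t : List Nat) :
    pvMaxI (n :: t) = max (max 0 (n : Int)) (pvMaxI t) := by
  rw [show pvMaxI (n :: t) = t.foldl (fun (x : Int) (m : Nat) => max x (m : Int)) (max 0 (n : Int)) from rfl,
      pvMaxI_acc t _ (by omega)]

lemma pvMaxI_nonneg (ns : List Nat) : 0 ≤ pvMaxI ns := by
  rw [show pvMaxI ns = ns.foldl (fun (x : Int) (m : Nat) => max x (m : Int)) 0 from rfl, pvMaxI_acc ns 0 le_rfl]
  omega

lemma pvR_le_maxI (s : List Char) : ∀ k : Nat, k ≠ 0 → (k : Int) ≤ pvMaxI (pvR s k) := by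
  induction s with
  | nil =>
      intro k hk
      simp only [pvR, if_neg hk, pvMaxI, List.foldl]
      omega
  | cons c t ih =>
      intro k hk
      by_cases hc : c = '`'
      · have h := ih (k + 1) (by omega)
        simp only [pvR, hc, if_pos rfl]
        push_cast at *
        omega
      · simp only [pvR, if_neg hc, if_neg hk]
        rw [pvMaxI_cons]
        omega

lemma pvA_fold (l : List Char) : ∀ (m : Int) (k : Nat), (k : Int) ≤ m →
    (l.foldl (fun st ch => if ch = '`' then (max st.1 (st.2 + 1), st.2 + 1) else (st.1, (0 : Int)))
      (m, (k : Int))).1 = max m (pvMaxI (pvR l k)) := by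
  induction l with
  | nil =>
      intro m k hk
      by_cases hk0 : k = 0
      · simp only [List.foldl, pvR, if_pos hk0, pvMaxI]
        omega
      · simp only [List.foldl, pvR, if_neg hk0]
        rw [show pvMaxI [k] = max 0 (k : Int) from rfl]
        omega
  | cons c t ih =>
      intro m k hk
      by_cases hc : c = '`'
      · have hcast : ((k : Int) + 1) = ((k + 1 : Nat) : Int) := by push_cast; ring
        simp only [List.foldl_cons, hc, eq_self_iff_true, if_true]
        rw [hcast, ih (max m ((k + 1 : Nat) : Int)) (k + 1) (by push_cast; omega)]
        have h1 := pvR_le_maxI t (k + 1) (by omega)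
        simp only [pvR, hc, eq_self_iff_true, if_true]
        push_cast at *
        omega
      · simp only [List.foldl_cons, if_neg hc]
        have h := ih m 0 (by omega)
        rw [Nat.cast_zero] at h
        rw [h]
        simp only [pvR, if_neg hc]
        by_cases hk0 : k = 0
        · simp [hk0]
        · rw [if_neg hk0, pvMaxI_cons]
          omega

lemma pvGo_nil (cur : List Char) (acc : List (List Char)) :
    PySem.Chars.split₀.go [] cur acc
      = if cur.isEmpty then acc.reverse else (cur.reverse :: acc).reverse := rfl

lemma pvGo_cons (c : Char) (rest cur : List Char) (acc : List (List Char)) :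
    PySem.Chars.split₀.go (c :: rest) cur acc
      = if PySem.Chars.isspace c then
          (if cur.isEmpty then PySem.Chars.split₀.go rest [] acc
           else PySem.Chars.split₀.go rest [] (cur.reverse :: acc))
        else PySem.Chars.split₀.go rest (c :: cur) acc := rfl

lemma pvGo_char (l : List Char) : ∀ (k : Nat) (acc : List (List Char)),
    PySem.Chars.split₀.go (l.map (fun ch => if ch = '`' then ch else ' ')) (List.replicate k '`') acc
      = acc.reverse ++ (pvR l k).map (fun n => List.replicate n '`') := by
  induction l with
  | nil =>
      intro k acc
      by_cases hk : k = 0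
      · simp [hk, pvGo_nil, pvR]
      · simp [pvGo_nil, pvR, hk, List.isEmpty_iff, List.replicate_eq_nil_iff,
              List.reverse_replicate]
  | cons c t ih =>
      intro k acc
      by_cases hc : c = '`'
      · have hrep : ('`' :: List.replicate k '`') = List.replicate (k + 1) '`' := by
          simp [List.replicate_succ]
        simp only [List.map, hc, eq_self_iff_true, if_true, pvGo_cons,
          show PySem.Chars.isspace '`' = false from rfl, Bool.false_eq_true, if_false]
        rw [hrep, ih (k + 1) acc]
        simp [pvR, hc]
      · simp only [List.map, if_neg hc, pvGo_cons,
          show PySem.Chars.isspace ' ' = true from rfl, if_true]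
        by_cases hk : k = 0
        · rw [if_pos (by simp [hk])]
          rw [show ([] : List Char) = List.replicate 0 '`' from rfl, ih 0 acc]
          simp [pvR, hc, hk]
        · rw [if_neg (by simp [List.isEmpty_iff, List.replicate_eq_nil_iff, hk])]
          rw [show ([] : List Char) = List.replicate 0 '`' from rfl, ih 0]
          simp [pvR, hc, hk, List.reverse_replicate]

-- ===== VERDICT (by name: the statement is the Claim_ definition above) =====
theorem count_max_backticks_spec : Claim_equal_count_max_backticks := by
  intro content _
  unfold Spec_count_max_backticks count_max_backticks count_max_backticks_alt
  rw [show ((0 : Int), (0 : Int)) = ((0 : Int), ((0 : Nat) : Int)) from rfl,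
      pvA_fold content.toList 0 0 (by omega)]
  simp only [PySem.Str.split₀]
  rw [show (String.ofList (content.toList.map fun ch => if ch = '`' then ch else ' ')).toList
        = content.toList.map (fun ch => if ch = '`' then ch else ' ') from by simp]
  unfold PySem.Chars.split₀
  rw [show ([] : List Char) = List.replicate 0 '`' from rfl, pvGo_char content.toList 0 []]
  simp only [List.reverse_nil, List.nil_append, List.map_map, List.foldl_map,
    Function.comp, PySem.Str.len, String.toList_ofList, List.length_replicate]
  rw [show List.foldl (fun (x : Int) (y : Nat) => max x (y : Int)) 0 (pvR content.toList 0)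
        = pvMaxI (pvR content.toList 0) from rfl]
  have h := pvMaxI_nonneg (pvR content.toList 0)
  omega
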